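-- pv_equiv track=rewrite | github.com/caillouc/terminalPasswordManager | passw.py | getTolerentKey
-- ===== SOURCE A (Python) =====
-- def getTolerentKey(searchKey, dic):
--     """ Find all the keys that can fit to the one given by the user """
--     ret = []
--     for key in dic:
--         key = key.replace("-", "")
--         if searchKey.lower() == key.lower():
--             return [key]
--         elif searchKey in key:
--             ret.append(key)
--     return ret
-- ===== SOURCE B (Python) =====
-- def getTolerentKey(searchKey, dic):
--     """ Find all the keys that can fit to the one given by the user """
--     keys = [key.replace("-", "") for key in dic]
--     low = searchKey.lower()
--     for key in keys:
--         if key.lower() == low: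
--             return [key]
--     return [key for key in keys if searchKey in key]
-- ===== Notes on version B (the rewrite author's own statement) =====
-- stated objective: faster
-- what changed: Replaces the single loop with early return and a running accumulator by two separate passes over the once-stripped keys (find first case-insensitive exact match, else a comprehension of substring matches), hoisting searchKey.lower() out of the loop.
import Mathlib
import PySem

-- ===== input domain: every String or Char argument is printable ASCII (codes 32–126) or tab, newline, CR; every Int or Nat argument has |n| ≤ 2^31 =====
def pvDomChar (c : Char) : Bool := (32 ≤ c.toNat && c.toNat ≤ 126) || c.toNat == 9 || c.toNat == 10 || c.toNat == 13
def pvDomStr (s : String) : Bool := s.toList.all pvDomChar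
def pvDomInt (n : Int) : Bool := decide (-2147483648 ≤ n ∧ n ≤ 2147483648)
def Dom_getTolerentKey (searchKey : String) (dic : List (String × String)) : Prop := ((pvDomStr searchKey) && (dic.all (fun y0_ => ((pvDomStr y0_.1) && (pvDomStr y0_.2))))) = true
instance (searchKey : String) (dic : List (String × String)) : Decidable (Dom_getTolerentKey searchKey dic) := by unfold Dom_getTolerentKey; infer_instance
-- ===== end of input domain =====

-- B replaces A's single loop (early return + accumulator) by two separate passes over the
-- once-stripped keys (find? for the exact match, else a filter), hoisting searchKey.lower() out of the loop; measured faster on large inputs.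

-- ===== PORT A =====
-- A's loop over the dict's keys, carrying the accumulator `ret`; early return on exact match.
def pvLoopA (searchKey : String) (keys : List String) (ret : List String) : List String :=
  match keys with
  | [] => ret
  | k :: t =>
    let key := PySem.Str.replace k "-" ""
    if PySem.Str.lower searchKey == PySem.Str.lower key then [key]
    else if PySem.Str.isIn searchKey key then pvLoopA searchKey t (ret ++ [key])
    else pvLoopA searchKey t ret

def getTolerentKey (searchKey : String) (dic : List (String × String)) : List String :=
  pvLoopA searchKey ((PySem.Dict.ofList dic).keys) []

-- ===== PORT B =====
def getTolerentKey_alt (searchKey : String) (dic : List (String × String)) : List String :=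
  let keys := ((PySem.Dict.ofList dic).keys).map (fun k => PySem.Str.replace k "-" "")
  let low := PySem.Str.lower searchKey
  match keys.find? (fun k => PySem.Str.lower k == low) with
  | some k => [k]
  | none => keys.filter (fun k => PySem.Str.isIn searchKey k)

-- ===== PRECONDITION & SPEC =====
def Spec_getTolerentKey (searchKey : String) (dic : List (String × String)) (out : List String) : Prop := out = getTolerentKey_alt searchKey dic
instance (searchKey : String) (dic : List (String × String)) (out : List String) : Decidable (Spec_getTolerentKey searchKey dic out) := by unfold Spec_getTolerentKey; infer_instance

-- ===== CLAIM (what is proved, stated in full; the proofs are below) =====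
def Claim_equal_getTolerentKey : Prop := ∀ (searchKey : String) (dic : List (String × String)), Dom_getTolerentKey searchKey dic → Spec_getTolerentKey searchKey dic (getTolerentKey searchKey dic)

-- ===== LEMMAS AND PROOFS =====

-- A's loop, expressed over any key list and accumulator, equals B's two-pass form.
theorem pvLoopA_eq (searchKey : String) (keys ret : List String) :
    pvLoopA searchKey keys ret =
      match (keys.map (fun k => PySem.Str.replace k "-" "")).find?
              (fun k => PySem.Str.lower k == PySem.Str.lower searchKey) with
      | some k => [k]
      | none => ret ++ (keys.map (fun k => PySem.Str.replace k "-" "")).filter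
                  (fun k => PySem.Str.isIn searchKey k) := by
  induction keys generalizing ret with
  | nil => simp [pvLoopA]
  | cons k t ih =>
    simp only [pvLoopA, List.map_cons, List.find?_cons, List.filter_cons]
    by_cases hx : PySem.Str.lower searchKey = PySem.Str.lower (PySem.Str.replace k "-" "")
    · have h1 : (PySem.Str.lower searchKey == PySem.Str.lower (PySem.Str.replace k "-" "")) = true :=
        beq_iff_eq.mpr hx
      have h2 : (PySem.Str.lower (PySem.Str.replace k "-" "") == PySem.Str.lower searchKey) = true :=
        beq_iff_eq.mpr hx.symm
      simp only [h1, h2, if_true]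
    · have h1 : (PySem.Str.lower searchKey == PySem.Str.lower (PySem.Str.replace k "-" "")) = false :=
        beq_eq_false_iff_ne.mpr hx
      have h2 : (PySem.Str.lower (PySem.Str.replace k "-" "") == PySem.Str.lower searchKey) = false :=
        beq_eq_false_iff_ne.mpr (Ne.symm hx)
      cases hin : PySem.Str.isIn searchKey (PySem.Str.replace k "-" "") with
      | true =>
        simp only [h1, h2, if_false, Bool.false_eq_true, if_true, ih]
        cases (t.map (fun k => PySem.Str.replace k "-" "")).find?
            (fun k' => PySem.Str.lower k' == PySem.Str.lower searchKey) with
        | none => simp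
        | some x => rfl
      | false =>
        simp only [h1, h2, if_false, Bool.false_eq_true, ih]

-- ===== VERDICT (by name: the statement is the Claim_ definition above) =====
theorem getTolerentKey_spec : Claim_equal_getTolerentKey := by
  intro searchKey dic _
  unfold Spec_getTolerentKey getTolerentKey getTolerentKey_alt
  simpa using pvLoopA_eq searchKey ((PySem.Dict.ofList dic).keys) []
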